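-- pv_equiv track=rewrite | github.com/vitperov/LetTheTinCanDoIt | modules/model/ResponseFilesParser.py | extract_filenames_from_response
-- ===== SOURCE A (Python) =====
-- def extract_filenames_from_response(response):
--     """
--     Extracts potential filenames from the response by finding patterns like **filename**.
--     It assumes filenames are enclosed in double asterisks (**) and can later be filtered.
--     """
--     extracted_files = []
--     start_index = 0
--     code_fence = "```"
--
--     while True:
--         # Find the next occurrence of ***
--         start_marker = response.find("***", start_index)
--         if start_marker == -1:
--             break  # No more *** found, exit the loop
--
--         # Find the closing *** or code fence for the file name
--         next_asterisks = response.find("***", start_marker + 3)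
--         next_fence = response.find(code_fence, start_marker + 3)
--
--         if next_asterisks == -1 and next_fence == -1:
--             break  # No closing marker, exit the loop
--
--         # Determine which marker comes first
--         if next_asterisks != -1 and (next_fence == -1 or next_asterisks < next_fence):
--             end_marker = next_asterisks
--             marker_length = 3
--         else:
--             end_marker = next_fence
--             marker_length = len(code_fence)
--
--         # Extract the potential filename
--         potential_filename = response[start_marker + 3:end_marker].strip()
--
--         # Add it to the list of extracted files
--         if potential_filename:
--             extracted_files.append(potential_filename)
--
--         # Move the start index forward to search for the next filename
--         start_index = end_marker + marker_length
--
--     return extracted_files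
-- ===== SOURCE B (Python) =====
-- def extract_filenames_from_response(response):
--     """
--     Extracts potential filenames enclosed between *** and a closing *** or ```.
--     Single pass: precompute all marker positions, then walk them with a tiny
--     open/close automaton (no repeated str.find rescans).
--     """
--     markers = [i for i in range(len(response) - 2)
--                if response[i] == response[i + 1] == response[i + 2]
--                and response[i] in "*`"]
--     extracted_files = []
--     opener = None
--     threshold = 0
--     for pos in markers:
--         if pos < threshold:
--             continue
--         if opener is None:
--             if response[pos] == '*':
--                 opener = pos
--                 threshold = pos + 3
--         else:
--             name = response[opener + 3:pos].strip()
--             if name: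
--                 extracted_files.append(name)
--             opener = None
--             threshold = pos + 3
--     return extracted_files
-- ===== Notes on version B (the rewrite author's own statement) =====
-- stated objective: alternative
-- what changed: A repeatedly rescans the string with three str.find calls per iteration of a while loop; B precomputes the list of all triple-star/triple-backtick marker positions in one pass and walks that list once with a small open/close automaton (threshold + optional opener), appending each stripped non-empty name.
import Mathlib
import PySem

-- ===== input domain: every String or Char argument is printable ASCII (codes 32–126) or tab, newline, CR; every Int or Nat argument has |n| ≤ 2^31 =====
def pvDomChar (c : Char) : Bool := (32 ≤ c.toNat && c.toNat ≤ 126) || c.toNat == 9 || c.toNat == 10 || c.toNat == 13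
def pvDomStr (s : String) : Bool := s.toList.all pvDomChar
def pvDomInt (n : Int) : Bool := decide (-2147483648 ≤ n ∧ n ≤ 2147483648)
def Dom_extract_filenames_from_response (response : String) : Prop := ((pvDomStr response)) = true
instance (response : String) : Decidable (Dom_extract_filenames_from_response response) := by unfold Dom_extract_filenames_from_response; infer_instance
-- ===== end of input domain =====

-- B replaces A's repeated str.find re-scans by one precomputed list of marker positions
-- walked once by a small open/close automaton (alternative single-pass structure, same result).

-- ===== PORT A =====
-- literal port of A's while-loop; fuel = length+1 strictly bounds the iteration count
-- (each iteration moves start_index forward by at least 6, so the fuel never runs out)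
def pvALoop (l : List Char) : Nat → Int → List String → List String
  | 0, _, acc => acc
  | fuel + 1, start_index, acc =>
    let start_marker := PySem.Chars.findFrom l ['*', '*', '*'] start_index
    if start_marker = -1 then acc
    else
      let next_asterisks := PySem.Chars.findFrom l ['*', '*', '*'] (start_marker + 3)
      let next_fence := PySem.Chars.findFrom l ['`', '`', '`'] (start_marker + 3)
      if next_asterisks = -1 ∧ next_fence = -1 then acc
      else
        -- (end_marker, marker_length); len("```") = 3
        let em :=
          if next_asterisks ≠ -1 ∧ (next_fence = -1 ∨ next_asterisks < next_fence)
          then (next_asterisks, (3 : Int))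
          else (next_fence, (3 : Int))
        let potential_filename :=
          PySem.Chars.strip (PySem.Chars.slice l (some (start_marker + 3)) (some em.1))
        let acc' := if potential_filename ≠ [] then acc ++ [String.ofList potential_filename] else acc
        pvALoop l fuel (em.1 + em.2) acc'

def extract_filenames_from_response (response : String) : List String :=
  pvALoop response.toList (response.toList.length + 1) 0 []

-- ===== PORT B =====
-- positions i with response[i] == response[i+1] == response[i+2] and response[i] in "*`"
-- ("in \"*`\"" ported as the two-character disjunction; exact)
def pvBMarkers (l : List Char) : List Int :=
  (PySem.List.pyRange 0 ((l.length : Int) - 2) 1).filter (fun i =>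
    (PySem.Chars.pyGet? l i == PySem.Chars.pyGet? l (i + 1)) &&
    (PySem.Chars.pyGet? l (i + 1) == PySem.Chars.pyGet? l (i + 2)) &&
    ((PySem.Chars.pyGet? l i == some '*') || (PySem.Chars.pyGet? l i == some '`')))

-- state: (extracted_files, opener, threshold)
def pvBStep (l : List Char) (st : List String × Option Int × Int) (pos : Int) :
    List String × Option Int × Int :=
  if pos < st.2.2 then st
  else
    match st.2.1 with
    | none =>
        if PySem.Chars.pyGet? l pos == some '*' then (st.1, some pos, pos + 3) else st
    | some opener =>
        let name := PySem.Chars.strip (PySem.Chars.slice l (some (opener + 3)) (some pos))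
        ((if name ≠ [] then st.1 ++ [String.ofList name] else st.1), none, pos + 3)

def extract_filenames_from_response_alt (response : String) : List String :=
  ((pvBMarkers response.toList).foldl (pvBStep response.toList) ([], none, 0)).1

-- ===== PRECONDITION & SPEC =====
def Spec_extract_filenames_from_response (response : String) (out : List String) : Prop := out = extract_filenames_from_response_alt response
instance (response : String) (out : List String) : Decidable (Spec_extract_filenames_from_response response out) := by unfold Spec_extract_filenames_from_response; infer_instance

-- ===== CLAIM (what is proved, stated in full; the proofs are below) =====
def Claim_equal_extract_filenames_from_response : Prop := ∀ (response : String), Dom_extract_filenames_from_response response → Spec_extract_filenames_from_response response (extract_filenames_from_response response)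

-- ===== LEMMAS AND PROOFS =====

-- first index i with t ≤ i < len and p i
def pvFF (p : Nat → Bool) (len t : Nat) : Option Nat :=
  (List.range len).find? (fun i => decide (t ≤ i) && p i)

def pvStarAt (l : List Char) (i : Nat) : Bool := decide (['*', '*', '*'] <+: l.drop i)
def pvFenceAt (l : List Char) (i : Nat) : Bool := decide (['`', '`', '`'] <+: l.drop i)
def pvMarkAt (l : List Char) (i : Nat) : Bool := pvStarAt l i || pvFenceAt l i

lemma pvFF_none_iff (p : Nat → Bool) (len t : Nat) :
    pvFF p len t = none ↔ ∀ i, t ≤ i → i < len → p i = false := by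
  simp only [pvFF, List.find?_eq_none, List.mem_range]
  constructor
  · intro h i ht hl
    have := h i hl
    simp only [Bool.and_eq_true, decide_eq_true_eq, not_and] at this
    simpa using this ht
  · intro h i hl
    simp only [Bool.and_eq_true, decide_eq_true_eq, not_and]
    intro ht
    simp [h i ht hl]

lemma pvFF_some_elim {p : Nat → Bool} {len t q : Nat} (h : pvFF p len t = some q) :
    t ≤ q ∧ q < len ∧ p q = true ∧ ∀ j, t ≤ j → j < q → p j = false := by
  induction len with
  | zero => simp [pvFF] at h
  | succ n ih =>
    rw [pvFF, List.range_succ, List.find?_append] at h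
    cases hfind : (List.range n).find? (fun i => decide (t ≤ i) && p i) with
    | some q' =>
      rw [hfind] at h
      rw [Option.some_or] at h
      injection h with h
      subst h
      have := ih hfind
      exact ⟨this.1, by omega, this.2.2.1, this.2.2.2⟩
    | none =>
      rw [hfind] at h
      simp only [Option.none_or, List.find?_singleton] at h
      by_cases hc : (decide (t ≤ n) && p n) = true
      · rw [if_pos hc] at h
        simp only [Option.some.injEq] at h
        subst h
        simp only [Bool.and_eq_true, decide_eq_true_eq] at hc
        refine ⟨hc.1, by omega, hc.2, ?_⟩
        have := (pvFF_none_iff p n t).mp hfind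
        intro j h1 h2; exact this j h1 h2
      · rw [if_neg hc] at h; exact absurd h (by simp)

lemma pvFF_some_intro {p : Nat → Bool} {len t q : Nat}
    (h1 : t ≤ q) (h2 : q < len) (h3 : p q = true)
    (h4 : ∀ j, t ≤ j → j < q → p j = false) : pvFF p len t = some q := by
  induction len with
  | zero => omega
  | succ n ih =>
    rw [pvFF, List.range_succ, List.find?_append]
    by_cases hq : q < n
    · have := ih hq
      rw [pvFF] at this
      rw [this]; rfl
    · have hqn : q = n := by omega
      subst hqn
      have : (List.range q).find? (fun i => decide (t ≤ i) && p i) = none := by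
        have := (pvFF_none_iff p q t).mpr (fun j hj hjq => h4 j hj hjq)
        simpa [pvFF] using this
      rw [this]
      simp [h1, h3]

lemma pvFF_or (p q : Nat → Bool) (len t : Nat) :
    pvFF (fun i => p i || q i) len t =
      match pvFF p len t, pvFF q len t with
      | none, none => none
      | some a, none => some a
      | none, some b => some b
      | some a, some b => some (min a b) := by
  cases hp : pvFF p len t with
  | none =>
    have hpn := (pvFF_none_iff p len t).mp hp
    cases hq : pvFF q len t with
    | none =>
      have hqn := (pvFF_none_iff q len t).mp hq
      exact (pvFF_none_iff _ len t).mpr (fun i h1 h2 => by simp [hpn i h1 h2, hqn i h1 h2])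
    | some b =>
      obtain ⟨e1, e2, e3, e4⟩ := pvFF_some_elim hq
      exact pvFF_some_intro e1 e2 (by simp [e3]) (fun j hj hjb => by simp [hpn j hj (by omega), e4 j hj hjb])
  | some a =>
    obtain ⟨d1, d2, d3, d4⟩ := pvFF_some_elim hp
    cases hq : pvFF q len t with
    | none =>
      have hqn := (pvFF_none_iff q len t).mp hq
      exact pvFF_some_intro d1 d2 (by simp [d3]) (fun j hj hja => by simp [hqn j hj (by omega), d4 j hj hja])
    | some b =>
      obtain ⟨e1, e2, e3, e4⟩ := pvFF_some_elim hq
      refine pvFF_some_intro (by omega) (by omega) ?_ ?_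
      · rcases Nat.le_total a b with h | h
        · simp [Nat.min_eq_left h, d3]
        · simp [Nat.min_eq_right h, e3]
      · intro j hj hjm
        simp [d4 j hj (by omega), e4 j hj (by omega)]

-- [x,x,x] is a prefix of l.drop e  iff the three characters at e are x
lemma pvTriple_prefix_iff (l : List Char) (e : Nat) (x : Char) :
    ([x, x, x] <+: l.drop e) ↔ (l[e]? = some x ∧ l[e + 1]? = some x ∧ l[e + 2]? = some x) := by
  have h0 : l[e]? = (l.drop e)[0]? := by rw [List.getElem?_drop]; ring_nf
  have h1 : l[e + 1]? = (l.drop e)[1]? := by rw [List.getElem?_drop]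
  have h2 : l[e + 2]? = (l.drop e)[2]? := by rw [List.getElem?_drop]
  rw [h0, h1, h2]
  generalize l.drop e = s
  match s with
  | [] => simp
  | [a] => simp [List.prefix_cons_iff]
  | [a, b] => simp [List.prefix_cons_iff]
  | a :: b :: c :: rest =>
    constructor
    · intro h
      obtain ⟨tl, htl⟩ := h
      simp at htl
      obtain ⟨r1, r2, r3, _⟩ := htl
      simp [← r1, ← r2, ← r3]
    · intro ⟨ha, hb, hc⟩
      simp at ha hb hc
      subst ha; subst hb; subst hc
      exact ⟨rest, by simp⟩

lemma pvPrefix_drop_lt {l pat : List Char} {i : Nat} (hpat : pat ≠ [])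
    (h : pat <+: l.drop i) : i + pat.length ≤ l.length := by
  have h1 := h.length_le
  simp only [List.length_drop] at h1
  have hne : l.drop i ≠ [] := by
    intro he; rw [he] at h; exact hpat (List.prefix_nil.mp h)
  have h2 : i < l.length := by
    by_contra hc
    exact hne (List.drop_eq_nil_of_le (by omega))
  omega

lemma pvMarkAt_bound {l : List Char} {i : Nat} (h : pvMarkAt l i = true) : i + 3 ≤ l.length := by
  rw [pvMarkAt, Bool.or_eq_true, pvStarAt, pvFenceAt] at h
  rcases h with h | h <;>
    · rw [decide_eq_true_eq] at h
      exact pvPrefix_drop_lt (by simp) h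

-- Python's s.find(sub, t) for 0 ≤ t ≤ len, as the first-index search pvFF
lemma pvFindFrom_eq (l : List Char) (pat : List Char) (hpat : pat ≠ []) (t : Nat)
    (ht : t ≤ l.length) :
    PySem.Chars.findFrom l pat (t : Int) =
      match pvFF (fun i => decide (pat <+: l.drop i)) l.length t with
      | none => -1
      | some q => (q : Int) := by
  cases hff : pvFF (fun i => decide (pat <+: l.drop i)) l.length t with
  | none =>
    have hn := (pvFF_none_iff _ l.length t).mp hff
    simp only []
    rw [PySem.Chars.findFrom_natCast_eq_neg_one_iff l pat t ht]
    rw [← PySem.Chars.isIn_iff_infix]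
    intro hin
    obtain ⟨j, hj⟩ := (PySem.Chars.exists_prefix_drop_iff_isIn pat (l.drop t)).mpr hin
    rw [List.drop_drop] at hj
    have hb := pvPrefix_drop_lt hpat hj
    have hlen : pat.length ≥ 1 := by cases pat with | nil => simp at hpat | cons a b => simp
    have h5 := hn (t + j) (by omega) (by omega)
    simp only [decide_eq_false_iff_not] at h5
    exact h5 hj
  | some q =>
    obtain ⟨e1, e2, e3, e4⟩ := pvFF_some_elim hff
    simp only [decide_eq_true_eq] at e3
    have hne : PySem.Chars.findFrom l pat (t : Int) ≠ -1 := by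
      intro heq
      have hni := (PySem.Chars.findFrom_natCast_eq_neg_one_iff l pat t ht).mp heq
      rw [← PySem.Chars.isIn_iff_infix] at hni
      rw [← PySem.Chars.exists_prefix_drop_iff_isIn] at hni
      exact hni ⟨q - t, by rw [List.drop_drop, (by omega : t + (q - t) = q)]; exact e3⟩
    obtain ⟨s1, s2, s3⟩ := PySem.Chars.findFrom_natCast_spec l pat t ht hne
    set f := PySem.Chars.findFrom l pat (t : Int) with hf
    have hf0 : (0:Int) ≤ f := le_trans (by exact_mod_cast Int.natCast_nonneg t) s1
    have htf : t ≤ f.toNat := by omega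
    have hq_le : q ≤ f.toNat := by
      by_contra hc
      rw [Nat.not_le] at hc
      have h6 := e4 f.toNat htf hc
      simp only [decide_eq_false_iff_not] at h6
      exact h6 s2
    have hf_le : f.toNat ≤ q := by
      by_contra hc
      rw [Nat.not_le] at hc
      exact (s3 q e1 hc) e3
    simp only []
    omega

-- push the stripped name between markers q and r (shared shape of both ports' append)
def pvPush (l : List Char) (q r : Nat) (acc : List String) : List String :=
  let pf := PySem.Chars.strip (PySem.Chars.slice l (some ((q : Int) + 3)) (some (r : Int)))
  if pf ≠ [] then acc ++ [String.ofList pf] else acc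

-- the common specification both loops compute
def pvSpec (l : List Char) (t : Nat) (acc : List String) : List String :=
  if h1 : (pvFF (pvStarAt l) l.length t).isSome then
    if h2 : (pvFF (pvMarkAt l) l.length ((pvFF (pvStarAt l) l.length t).get h1 + 3)).isSome then
      pvSpec l ((pvFF (pvMarkAt l) l.length ((pvFF (pvStarAt l) l.length t).get h1 + 3)).get h2 + 3)
        (pvPush l ((pvFF (pvStarAt l) l.length t).get h1)
          ((pvFF (pvMarkAt l) l.length ((pvFF (pvStarAt l) l.length t).get h1 + 3)).get h2) acc)
    else acc
  else acc
termination_by l.length - t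
decreasing_by
  have e1 := pvFF_some_elim (Option.some_get h1).symm
  have e2 := pvFF_some_elim (Option.some_get h2).symm
  omega

lemma pvSpec_none {l : List Char} {t : Nat} (acc : List String)
    (h : pvFF (pvStarAt l) l.length t = none) : pvSpec l t acc = acc := by
  unfold pvSpec
  simp [h]

lemma pvSpec_sn {l : List Char} {t q : Nat} (acc : List String)
    (h1 : pvFF (pvStarAt l) l.length t = some q)
    (h2 : pvFF (pvMarkAt l) l.length (q + 3) = none) : pvSpec l t acc = acc := by
  unfold pvSpec
  simp [h1, h2]

lemma pvSpec_ss {l : List Char} {t q r : Nat} (acc : List String)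
    (h1 : pvFF (pvStarAt l) l.length t = some q)
    (h2 : pvFF (pvMarkAt l) l.length (q + 3) = some r) :
    pvSpec l t acc = pvSpec l (r + 3) (pvPush l q r acc) := by
  conv_lhs => rw [pvSpec.eq_def]
  simp [h1, h2]

lemma pvFindStar (l : List Char) (t : Nat) (ht : t ≤ l.length) :
    PySem.Chars.findFrom l ['*', '*', '*'] (t : Int) =
      match pvFF (pvStarAt l) l.length t with
      | none => -1
      | some q => (q : Int) :=
  pvFindFrom_eq l _ (by simp) t ht

lemma pvFindFence (l : List Char) (t : Nat) (ht : t ≤ l.length) :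
    PySem.Chars.findFrom l ['`', '`', '`'] (t : Int) =
      match pvFF (pvFenceAt l) l.length t with
      | none => -1
      | some q => (q : Int) :=
  pvFindFrom_eq l _ (by simp) t ht

lemma pvFF_mark (l : List Char) (len t : Nat) :
    pvFF (pvMarkAt l) len t =
      match pvFF (pvStarAt l) len t, pvFF (pvFenceAt l) len t with
      | none, none => none
      | some a, none => some a
      | none, some b => some b
      | some a, some b => some (min a b) :=
  pvFF_or (pvStarAt l) (pvFenceAt l) len t

lemma pvStar_bound {l : List Char} {q : Nat} (h : pvStarAt l q = true) : q + 3 ≤ l.length :=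
  pvMarkAt_bound (by simp [pvMarkAt, h])

lemma pvALoop_eq_spec (l : List Char) :
    ∀ fuel (t : Nat) (acc : List String), t ≤ l.length → l.length - t < fuel →
      pvALoop l fuel (t : Int) acc = pvSpec l t acc := by
  intro fuel
  induction fuel with
  | zero => intro t acc ht hf; omega
  | succ n ih =>
    intro t acc ht hf
    simp only [pvALoop]
    rw [pvFindStar l t ht]
    cases hq : pvFF (pvStarAt l) l.length t with
    | none => simp [pvSpec_none acc hq]
    | some q =>
      obtain ⟨hq1, hq2, hq3, hq4⟩ := pvFF_some_elim hq
      have hqb : q + 3 ≤ l.length := pvStar_bound hq3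
      rw [if_neg (by omega : ¬((q : Int) = -1))]
      have hcast : (q : Int) + 3 = ((q + 3 : Nat) : Int) := by push_cast; ring
      cases hna : pvFF (pvStarAt l) l.length (q + 3) with
      | none =>
        have hfs : PySem.Chars.findFrom l ['*', '*', '*'] ((q : Int) + 3) = -1 := by
          rw [hcast, pvFindStar l (q + 3) hqb, hna]
        cases hnf : pvFF (pvFenceAt l) l.length (q + 3) with
        | none =>
          have hff : PySem.Chars.findFrom l ['`', '`', '`'] ((q : Int) + 3) = -1 := by
            rw [hcast, pvFindFence l (q + 3) hqb, hnf]
          have hm : pvFF (pvMarkAt l) l.length (q + 3) = none := by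
            rw [pvFF_mark, hna, hnf]
          rw [hfs, hff, if_pos ⟨rfl, rfl⟩]
          rw [pvSpec_sn acc hq hm]
        | some b =>
          have hff : PySem.Chars.findFrom l ['`', '`', '`'] ((q : Int) + 3) = (b : Int) := by
            rw [hcast, pvFindFence l (q + 3) hqb, hnf]
          have hm : pvFF (pvMarkAt l) l.length (q + 3) = some b := by
            rw [pvFF_mark, hna, hnf]
          obtain ⟨hb1, hb2, hb3, _⟩ := pvFF_some_elim hm
          have hbb : b + 3 ≤ l.length := pvMarkAt_bound hb3
          have hfuel : l.length - (b + 3) < n := by omega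
          rw [hfs, hff]
          rw [if_neg (by intro hcon; omega)]
          rw [if_neg (by intro hcon; exact hcon.1 rfl)]
          have hc : (b : Int) + 3 = ((b + 3 : Nat) : Int) := by push_cast; ring
          rw [hc, ih (b + 3) _ hbb hfuel]
          rw [pvSpec_ss acc hq hm]
          rfl
      | some a =>
        have hfs : PySem.Chars.findFrom l ['*', '*', '*'] ((q : Int) + 3) = (a : Int) := by
          rw [hcast, pvFindStar l (q + 3) hqb, hna]
        obtain ⟨ha1, ha2, ha3, ha4⟩ := pvFF_some_elim hna
        have hab3 : a + 3 ≤ l.length := pvStar_bound ha3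
        cases hnf : pvFF (pvFenceAt l) l.length (q + 3) with
        | none =>
          have hff : PySem.Chars.findFrom l ['`', '`', '`'] ((q : Int) + 3) = -1 := by
            rw [hcast, pvFindFence l (q + 3) hqb, hnf]
          have hm : pvFF (pvMarkAt l) l.length (q + 3) = some a := by
            rw [pvFF_mark, hna, hnf]
          have hfuel : l.length - (a + 3) < n := by omega
          rw [hfs, hff]
          rw [if_neg (by intro hcon; omega)]
          rw [if_pos ⟨by omega, Or.inl rfl⟩]
          have hc : (a : Int) + 3 = ((a + 3 : Nat) : Int) := by push_cast; ring
          rw [hc, ih (a + 3) _ hab3 hfuel]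
          rw [pvSpec_ss acc hq hm]
          rfl
        | some b =>
          have hff : PySem.Chars.findFrom l ['`', '`', '`'] ((q : Int) + 3) = (b : Int) := by
            rw [hcast, pvFindFence l (q + 3) hqb, hnf]
          obtain ⟨hb1, hb2, hb3, _⟩ := pvFF_some_elim hnf
          have hbb3 : b + 3 ≤ l.length := pvMarkAt_bound (by simp [pvMarkAt, hb3])
          rw [hfs, hff]
          rw [if_neg (by intro hcon; omega)]
          by_cases hab : a < b
          · rw [if_pos ⟨by omega, Or.inr (by exact_mod_cast hab)⟩]
            have hm2 : pvFF (pvMarkAt l) l.length (q + 3) = some a := by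
              rw [pvFF_mark, hna, hnf]; simp [Nat.min_eq_left (by omega : a ≤ b)]
            have hfuel : l.length - (a + 3) < n := by omega
            have hc : (a : Int) + 3 = ((a + 3 : Nat) : Int) := by push_cast; ring
            rw [hc, ih (a + 3) _ hab3 hfuel]
            rw [pvSpec_ss acc hq hm2]
            rfl
          · rw [if_neg (by intro hcon; omega)]
            have hm2 : pvFF (pvMarkAt l) l.length (q + 3) = some b := by
              rw [pvFF_mark, hna, hnf]; simp [Nat.min_eq_right (by omega : b ≤ a)]
            have hfuel : l.length - (b + 3) < n := by omega
            have hc : (b : Int) + 3 = ((b + 3 : Nat) : Int) := by push_cast; ring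
            rw [hc, ih (b + 3) _ hbb3 hfuel]
            rw [pvSpec_ss acc hq hm2]
            rfl

lemma pvStar_char {l : List Char} {e : Nat} (h : pvStarAt l e = true) : l[e]? = some '*' :=
  ((pvTriple_prefix_iff l e '*').mp (by simpa [pvStarAt] using h)).1

lemma pvFence_char {l : List Char} {e : Nat} (h : pvFenceAt l e = true) : l[e]? = some '`' :=
  ((pvTriple_prefix_iff l e '`').mp (by simpa [pvFenceAt] using h)).1

lemma pvStep_skip (l : List Char) (acc : List String) (o : Option Int) (t e : Nat)
    (h : e < t) : pvBStep l (acc, o, (t : Int)) (e : Int) = (acc, o, (t : Int)) := by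
  simp [pvBStep, show ((e : Int) < (t : Int)) by exact_mod_cast h]

lemma pvStep_open (l : List Char) (acc : List String) (t e : Nat)
    (h : ¬ e < t) (hc : l[e]? = some '*') :
    pvBStep l (acc, none, (t : Int)) (e : Int) = (acc, some (e : Int), ((e + 3 : Nat) : Int)) := by
  have hlt' : ¬ ((e : Int) < (t : Int)) := by exact_mod_cast h
  simp [pvBStep, hlt', hc]

lemma pvStep_noopen (l : List Char) (acc : List String) (t e : Nat)
    (h : ¬ e < t) (hc : l[e]? = some '`') :
    pvBStep l (acc, none, (t : Int)) (e : Int) = (acc, none, (t : Int)) := by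
  have hlt' : ¬ ((e : Int) < (t : Int)) := by exact_mod_cast h
  simp [pvBStep, hlt', hc]

lemma pvStep_close (l : List Char) (acc : List String) (t e q : Nat)
    (h : ¬ e < t) :
    pvBStep l (acc, some (q : Int), (t : Int)) (e : Int) =
      (pvPush l q e acc, none, ((e + 3 : Nat) : Int)) := by
  have hlt' : ¬ ((e : Int) < (t : Int)) := by exact_mod_cast h
  simp [pvBStep, hlt', pvPush]

lemma pvBFold (l : List Char) :
    ∀ (M : List Nat), (∀ x ∈ M, pvMarkAt l x = true) → M.Pairwise (· < ·) →
      (∀ (t : Nat) (acc : List String),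
        (∀ i, pvStarAt l i = true → t ≤ i → i ∈ M) →
        (∀ i j, pvMarkAt l i = true → j ∈ M → j < i → i ∈ M) →
        (M.foldl (fun st (x : Nat) => pvBStep l st (x : Int)) (acc, none, (t : Int))).1 = pvSpec l t acc)
      ∧ (∀ (t : Nat) (acc : List String) (q : Nat),
        (∀ i, pvMarkAt l i = true → t ≤ i → i ∈ M) →
        (∀ i j, pvMarkAt l i = true → j ∈ M → j < i → i ∈ M) →
        (M.foldl (fun st (x : Nat) => pvBStep l st (x : Int)) (acc, some (q : Int), (t : Int))).1 =
          match pvFF (pvMarkAt l) l.length t with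
          | none => acc
          | some r => pvSpec l (r + 3) (pvPush l q r acc)) := by
  intro M
  induction M with
  | nil =>
    intro _ _
    constructor
    · intro t acc hC1 _
      cases hk : pvFF (pvStarAt l) l.length t with
      | none => simp [pvSpec_none acc hk]
      | some k =>
        obtain ⟨k1, _, k3, _⟩ := pvFF_some_elim hk
        exact absurd (hC1 k k3 k1) (by simp)
    · intro t acc q hC _
      cases hk : pvFF (pvMarkAt l) l.length t with
      | none => simp
      | some k =>
        obtain ⟨k1, _, k3, _⟩ := pvFF_some_elim hk
        exact absurd (hC k k3 k1) (by simp)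
  | cons e M' ih =>
    intro hsound hsort
    have hsound' : ∀ x ∈ M', pvMarkAt l x = true :=
      fun x hx => hsound x (List.mem_cons_of_mem e hx)
    have hlt : ∀ x ∈ M', e < x := (List.pairwise_cons.mp hsort).1
    have hsort' := (List.pairwise_cons.mp hsort).2
    have ihn := (ih hsound' hsort').1
    have ihs := (ih hsound' hsort').2
    have hme : pvMarkAt l e = true := hsound e List.mem_cons_self
    have helen : e + 3 ≤ l.length := pvMarkAt_bound hme
    constructor
    · intro t acc hC1 hC2
      rw [List.foldl_cons]
      by_cases het : e < t
      · rw [pvStep_skip l acc none t e het]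
        refine ihn t acc ?_ ?_
        · intro i hi hti
          rcases List.mem_cons.mp (hC1 i hi hti) with h | h
          · omega
          · exact h
        · intro i j hi hj hji
          rcases List.mem_cons.mp (hC2 i j hi (List.mem_cons_of_mem e hj) hji) with h | h
          · have := hlt j hj; omega
          · exact h
      · cases hse : pvStarAt l e with
        | true =>
          rw [pvStep_open l acc t e het (pvStar_char hse)]
          have hqe : pvFF (pvStarAt l) l.length t = some e :=
            pvFF_some_intro (by omega) (by omega) hse
              (fun j hj hje => by
                cases hsj : pvStarAt l j with
                | false => rfl
                | true =>
                  rcases List.mem_cons.mp (hC1 j hsj hj) with h | h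
                  · omega
                  · have := hlt j h; omega)
          have hfold := ihs (e + 3) acc e
            (fun i hi hti => by
              rcases List.mem_cons.mp (hC2 i e hi List.mem_cons_self (by omega)) with h | h
              · omega
              · exact h)
            (fun i j hi hj hji => by
              rcases List.mem_cons.mp (hC2 i j hi (List.mem_cons_of_mem e hj) hji) with h | h
              · have := hlt j hj; omega
              · exact h)
          rw [hfold]
          cases hmm : pvFF (pvMarkAt l) l.length (e + 3) with
          | none => rw [pvSpec_sn acc hqe hmm]
          | some r => rw [pvSpec_ss acc hqe hmm]
        | false =>
          have hfe : pvFenceAt l e = true := by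
            rw [pvMarkAt, hse] at hme; simpa using hme
          rw [pvStep_noopen l acc t e het (pvFence_char hfe)]
          refine ihn t acc ?_ ?_
          · intro i hi hti
            rcases List.mem_cons.mp (hC1 i hi hti) with h | h
            · rw [h] at hi; rw [hi] at hse; exact absurd hse (by simp)
            · exact h
          · intro i j hi hj hji
            rcases List.mem_cons.mp (hC2 i j hi (List.mem_cons_of_mem e hj) hji) with h | h
            · have := hlt j hj; omega
            · exact h
    · intro t acc q hC hC2
      rw [List.foldl_cons]
      by_cases het : e < t
      · rw [pvStep_skip l acc (some (q : Int)) t e het]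
        refine ihs t acc q ?_ ?_
        · intro i hi hti
          rcases List.mem_cons.mp (hC i hi hti) with h | h
          · omega
          · exact h
        · intro i j hi hj hji
          rcases List.mem_cons.mp (hC2 i j hi (List.mem_cons_of_mem e hj) hji) with h | h
          · have := hlt j hj; omega
          · exact h
      · rw [pvStep_close l acc t e q het]
        have hre : pvFF (pvMarkAt l) l.length t = some e :=
          pvFF_some_intro (by omega) (by omega) hme
            (fun j hj hje => by
              cases hsj : pvMarkAt l j with
              | false => rfl
              | true =>
                rcases List.mem_cons.mp (hC j hsj hj) with h | h
                · omega
                · have := hlt j h; omega)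
        rw [hre]
        exact ihn (e + 3) (pvPush l q e acc)
          (fun i hi hti => by
            rcases List.mem_cons.mp
              (hC2 i e (by simp [pvMarkAt, hi]) List.mem_cons_self (by omega)) with h | h
            · omega
            · exact h)
          (fun i j hi hj hji => by
            rcases List.mem_cons.mp (hC2 i j hi (List.mem_cons_of_mem e hj) hji) with h | h
            · have := hlt j hj; omega
            · exact h)

lemma pvOptTriple (o0 o1 o2 : Option Char) :
    ((o0 == o1) && (o1 == o2) && ((o0 == some '*') || (o0 == some '`')))
      = (decide (o0 = some '*' ∧ o1 = some '*' ∧ o2 = some '*')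
         || decide (o0 = some '`' ∧ o1 = some '`' ∧ o2 = some '`')) := by
  rw [Bool.eq_iff_iff]
  simp only [Bool.and_eq_true, Bool.or_eq_true, beq_iff_eq, decide_eq_true_eq]
  constructor
  · rintro ⟨⟨h01, h12⟩, h | h⟩
    · exact Or.inl ⟨h, h01.symm.trans h, h12.symm.trans (h01.symm.trans h)⟩
    · exact Or.inr ⟨h, h01.symm.trans h, h12.symm.trans (h01.symm.trans h)⟩
  · rintro (⟨ha, hb, hc⟩ | ⟨ha, hb, hc⟩)
    · exact ⟨⟨ha.trans hb.symm, hb.trans hc.symm⟩, Or.inl ha⟩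
    · exact ⟨⟨ha.trans hb.symm, hb.trans hc.symm⟩, Or.inr ha⟩

lemma pvBMarkers_eq (l : List Char) :
    pvBMarkers l = ((List.range l.length).filter (pvMarkAt l)).map (fun n : Nat => (n : Int)) := by
  by_cases hl : l.length < 2
  · have h1 : pvBMarkers l = [] := by
      rw [pvBMarkers]
      apply List.eq_nil_iff_forall_not_mem.mpr
      intro x hx
      have := PySem.List.mem_pyRange_one.mp (List.mem_of_mem_filter hx)
      omega
    have h2 : (List.range l.length).filter (pvMarkAt l) = [] := by
      apply List.filter_eq_nil_iff.mpr
      intro a ha hma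
      have := pvMarkAt_bound hma
      have := List.mem_range.mp ha
      omega
    rw [h1, h2]; rfl
  · rw [pvBMarkers]
    have hcast : ((l.length : Int) - 2) = ((l.length - 2 : Nat) : Int) := by omega
    rw [hcast, PySem.List.pyRange_zero_natCast, List.filter_map]
    have hsplit : List.range l.length =
        List.range (l.length - 2) ++ (List.range 2).map (fun x => (l.length - 2) + x) := by
      have h2 : l.length = (l.length - 2) + 2 := by omega
      conv_lhs => rw [h2, List.range_add]
    rw [hsplit, List.filter_append]
    have hnil : ((List.range 2).map (fun x => (l.length - 2) + x)).filter (pvMarkAt l) = [] := by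
      apply List.filter_eq_nil_iff.mpr
      intro a ha hma
      have hb := pvMarkAt_bound hma
      obtain ⟨x, hx, rfl⟩ := List.mem_map.mp ha
      have := List.mem_range.mp hx
      omega
    rw [hnil, List.append_nil]
    refine congrArg (List.map (fun n : Nat => (n : Int))) (List.filter_congr ?_)
    intro e he
    simp only [Function.comp_apply]
    have g0 : PySem.Chars.pyGet? l ((e : Nat) : Int) = l[e]? := by simp
    have g1 : PySem.Chars.pyGet? l ((e : Int) + 1) = l[e + 1]? := by
      rw [show ((e : Int) + 1) = ((e + 1 : Nat) : Int) by push_cast; ring]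
      rw [PySem.Chars.pyGet?_eq_listPyGet?, PySem.List.pyGet?_natCast]
    have g2 : PySem.Chars.pyGet? l ((e : Int) + 2) = l[e + 2]? := by
      rw [show ((e : Int) + 2) = ((e + 2 : Nat) : Int) by push_cast; ring]
      rw [PySem.Chars.pyGet?_eq_listPyGet?, PySem.List.pyGet?_natCast]
    rw [g0, g1, g2]
    rw [pvMarkAt, pvStarAt, pvFenceAt]
    simp only [pvTriple_prefix_iff]
    exact pvOptTriple l[e]? l[e + 1]? l[e + 2]?

theorem extract_filenames_from_response_spec : Claim_equal_extract_filenames_from_response := by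
  intro response _
  unfold Spec_extract_filenames_from_response
  unfold extract_filenames_from_response extract_filenames_from_response_alt
  set l := response.toList
  have hA : pvALoop l (l.length + 1) ((0 : Nat) : Int) [] = pvSpec l 0 [] :=
    pvALoop_eq_spec l (l.length + 1) 0 [] (by omega) (by omega)
  have hMem : ∀ i, pvMarkAt l i = true → i ∈ (List.range l.length).filter (pvMarkAt l) := by
    intro i hi
    have := pvMarkAt_bound hi
    exact List.mem_filter.mpr ⟨List.mem_range.mpr (by omega), hi⟩
  have hB := (pvBFold l ((List.range l.length).filter (pvMarkAt l))
    (fun e he => (List.mem_filter.mp he).2)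
    (List.Pairwise.filter _ List.pairwise_lt_range)).1 0 []
    (fun i hi _ => hMem i (by simp [pvMarkAt, hi]))
    (fun i j hi _ _ => hMem i hi)
  have hBM : (pvBMarkers l).foldl (pvBStep l) ([], none, 0) =
      ((List.range l.length).filter (pvMarkAt l)).foldl
        (fun st (x : Nat) => pvBStep l st (x : Int)) ([], none, 0) := by
    rw [pvBMarkers_eq, List.foldl_map]
  simp only [Int.natCast_zero] at hA hB
  rw [hBM, hB]
  exact hA
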